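-- pv_equiv track=rewrite | github.com/als7928/Prompt-Optimization-with-Generalized-Feedback | src/prompt_optim_agent/world_model/gradient_descent.py | fill_masks
-- ===== SOURCE A (Python) =====
-- def fill_masks(feedback_with_mask, candidates_dict):
--     masks = [f"MASK_{i}" for i in range(1, len(candidates_dict) + 1)] #MASK_1, MASK_2...
--
--     replacements = [candidates_dict[mask] for mask in masks]
--     from itertools import product
--     all_combinations = list(product(*replacements))
--
--     filled_sentences = []
--     for combination in all_combinations:
--         filled_sentence = feedback_with_mask
--         for mask, replacement in zip(masks, combination):
--             filled_sentence = filled_sentence.replace(f"[{mask}]", replacement)  # Replace one instance at a time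
--         filled_sentences.append(filled_sentence)
--
--     return filled_sentences
-- ===== SOURCE B (Python) =====
-- def fill_masks(feedback_with_mask, candidates_dict):
--     results = [feedback_with_mask]
--     for i in range(1, len(candidates_dict) + 1):
--         candidates = candidates_dict[f"MASK_{i}"]
--         results = [s.replace(f"[MASK_{i}]", c) for s in results for c in candidates]
--     return results
-- ===== Notes on version B (the rewrite author's own statement) =====
-- stated objective: simpler
-- what changed: Replaces itertools.product plus a per-combination replacement loop by an incremental expansion: starting from [feedback_with_mask], each mask pass rewrites every partial result with each of its candidates, so no combination tuples are ever materialized.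
import Mathlib
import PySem

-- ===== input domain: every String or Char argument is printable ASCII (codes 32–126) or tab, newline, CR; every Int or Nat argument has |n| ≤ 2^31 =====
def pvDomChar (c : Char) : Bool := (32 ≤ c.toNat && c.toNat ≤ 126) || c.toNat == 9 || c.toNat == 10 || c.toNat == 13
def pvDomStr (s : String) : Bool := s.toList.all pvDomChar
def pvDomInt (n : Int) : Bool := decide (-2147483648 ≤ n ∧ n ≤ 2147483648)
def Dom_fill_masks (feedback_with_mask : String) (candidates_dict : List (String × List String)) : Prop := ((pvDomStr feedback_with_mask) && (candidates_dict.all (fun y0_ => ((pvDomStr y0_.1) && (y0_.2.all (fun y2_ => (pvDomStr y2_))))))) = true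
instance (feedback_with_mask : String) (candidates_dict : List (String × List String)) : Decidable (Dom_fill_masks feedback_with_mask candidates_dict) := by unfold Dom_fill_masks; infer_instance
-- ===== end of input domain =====

-- B replaces itertools.product + per-combination replacement loop by incremental expansion of partial results (simpler decomposition, same outputs/order).


-- ===== PORT A =====
-- itertools.product(*lists): first list varies slowest
def pvProduct : List (List String) → List (List String)
  | [] => [[]]
  | xs :: rest => xs.flatMap (fun x => (pvProduct rest).map (x :: ·))

def fill_masks (feedback_with_mask : String) (candidates_dict : List (String × List String)) : List String :=
  let masks := (PySem.List.pyRange 1 ((candidates_dict.length : Int) + 1) 1).map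
    (fun i => "MASK_" ++ PySem.Int.toStr i)
  let replacements := masks.map (fun m => (candidates_dict.lookup m).getD [])
  let all_combinations := pvProduct replacements
  all_combinations.map (fun combination =>
    (masks.zip combination).foldl
      (fun filled_sentence mc => PySem.Str.replace filled_sentence ("[" ++ mc.1 ++ "]") mc.2)
      feedback_with_mask)

-- ===== PORT B =====
def fill_masks_alt (feedback_with_mask : String) (candidates_dict : List (String × List String)) : List String :=
  (PySem.List.pyRange 1 ((candidates_dict.length : Int) + 1) 1).foldl
    (fun results i =>
      let candidates := (candidates_dict.lookup ("MASK_" ++ PySem.Int.toStr i)).getD []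
      results.flatMap (fun s =>
        candidates.map (fun c => PySem.Str.replace s ("[MASK_" ++ PySem.Int.toStr i ++ "]") c)))
    [feedback_with_mask]

-- ===== PRECONDITION & SPEC =====
-- Pre_ excludes only inputs on which Python A raises KeyError: some key "MASK_i" (1 ≤ i ≤ len) absent.
def Pre_fill_masks (feedback_with_mask : String) (candidates_dict : List (String × List String)) : Prop :=
  ∀ i ∈ List.range candidates_dict.length,
    (candidates_dict.lookup ("MASK_" ++ PySem.Int.toStr ((i : Int) + 1))).isSome = true
instance (feedback_with_mask : String) (candidates_dict : List (String × List String)) : Decidable (Pre_fill_masks feedback_with_mask candidates_dict) := by unfold Pre_fill_masks; infer_instance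

def pvWitness_fill_masks : String × (List (String × List String)) :=
  ("x [MASK_1] y [MASK_2]", [("MASK_1", ["a", "b"]), ("MASK_2", ["c"])])

def Spec_fill_masks (feedback_with_mask : String) (candidates_dict : List (String × List String)) (out : List String) : Prop := out = fill_masks_alt feedback_with_mask candidates_dict
instance (feedback_with_mask : String) (candidates_dict : List (String × List String)) (out : List String) : Decidable (Spec_fill_masks feedback_with_mask candidates_dict out) := by unfold Spec_fill_masks; infer_instance

-- ===== CLAIM (what is proved, stated in full; the proofs are below) =====
def Claim_equal_fill_masks : Prop := ∀ (feedback_with_mask : String) (candidates_dict : List (String × List String)), Dom_fill_masks feedback_with_mask candidates_dict → Pre_fill_masks feedback_with_mask candidates_dict → Spec_fill_masks feedback_with_mask candidates_dict (fill_masks feedback_with_mask candidates_dict)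

-- ===== LEMMAS AND PROOFS =====

-- B's expansion step, abstracted over the (mask, candidates) pair
def pvStep (acc : List String) (p : String × List String) : List String :=
  acc.flatMap (fun s => p.2.map (fun c => PySem.Str.replace s ("[" ++ p.1 ++ "]") c))

lemma pvStep_append (a b : List String) (p : String × List String) :
    pvStep (a ++ b) p = pvStep a p ++ pvStep b p := by
  simp [pvStep]

lemma foldl_pvStep_nil (pairs : List (String × List String)) :
    List.foldl pvStep [] pairs = [] := by
  induction pairs with
  | nil => rfl
  | cons p rest ih => simpa [pvStep] using ih

lemma foldl_pvStep_append (pairs : List (String × List String)) (a b : List String) :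
    List.foldl pvStep (a ++ b) pairs = List.foldl pvStep a pairs ++ List.foldl pvStep b pairs := by
  induction pairs generalizing a b with
  | nil => rfl
  | cons p rest ih => simp only [List.foldl_cons, pvStep_append]; exact ih _ _

lemma foldl_pvStep_flatMap (xs : List String) (pairs : List (String × List String)) :
    List.foldl pvStep xs pairs = xs.flatMap (fun x => List.foldl pvStep [x] pairs) := by
  induction xs with
  | nil => simpa using foldl_pvStep_nil pairs
  | cons x xs ih =>
      have : x :: xs = [x] ++ xs := rfl
      rw [this, foldl_pvStep_append, ih]
      simp

-- main bridge: incremental expansion = map-over-product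
lemma foldl_pvStep_eq_product (pairs : List (String × List String)) (f : String) :
    List.foldl pvStep [f] pairs
      = (pvProduct (pairs.map Prod.snd)).map (fun combo =>
          ((pairs.map Prod.fst).zip combo).foldl
            (fun s mc => PySem.Str.replace s ("[" ++ mc.1 ++ "]") mc.2) f) := by
  induction pairs generalizing f with
  | nil => simp [pvProduct]
  | cons p rest ih =>
      simp only [List.foldl_cons, List.map_cons, pvProduct]
      have hstep : pvStep [f] p = p.2.map (fun c => PySem.Str.replace f ("[" ++ p.1 ++ "]") c) := by
        simp [pvStep]
      rw [hstep, foldl_pvStep_flatMap]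
      simp only [List.map_flatMap, List.flatMap_map]
      refine List.flatMap_congr ?_
      intro c _
      rw [ih]
      simp [List.map_map, Function.comp]

lemma bracket_assoc (t : String) : "[MASK_" ++ t ++ "]" = "[" ++ ("MASK_" ++ t) ++ "]" := by
  simp [String.append_assoc]
  rfl

theorem fill_masks_eq_alt (f : String) (d : List (String × List String)) :
    fill_masks f d = fill_masks_alt f d := by
  unfold fill_masks fill_masks_alt
  set r := PySem.List.pyRange 1 ((d.length : Int) + 1) 1 with hr
  set pairfn : Int → String × List String :=
    fun i => ("MASK_" ++ PySem.Int.toStr i,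
              (d.lookup ("MASK_" ++ PySem.Int.toStr i)).getD []) with hpf
  have hB : (r.foldl
      (fun results i =>
        let candidates := (d.lookup ("MASK_" ++ PySem.Int.toStr i)).getD []
        results.flatMap (fun s =>
          candidates.map (fun c => PySem.Str.replace s ("[MASK_" ++ PySem.Int.toStr i ++ "]") c)))
      [f]) = List.foldl pvStep [f] (r.map pairfn) := by
    simp only [bracket_assoc]
    rw [List.foldl_map]
    rfl
  rw [hB, foldl_pvStep_eq_product]
  simp only [hpf, List.map_map, Function.comp_def]

-- ===== VERDICT (by name: the statement is the Claim_ definition above) =====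
theorem fill_masks_spec : Claim_equal_fill_masks := by
  intro f d _ _
  unfold Spec_fill_masks
  exact fill_masks_eq_alt f d
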